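-- pv_equiv track=rewrite | github.com/DavidZhaoL/NLP-Name-Entity-Recognization | NER-tradition.py | candidateTagSet
-- ===== SOURCE A (Python) =====
-- def candidateTagSet(length):
--     tagSet=('O','PER','LOC','ORG','MISC')
--     n,tagList=1,[['O'],['PER'],['LOC'],['ORG'],['MISC']]
--
--     while n<length:
--         CurrentTagList=[]
--         for item in tagList:
--             for tag in tagSet:
--                 currentTag=item.copy()
--                 currentTag.append(tag)
--                 CurrentTagList.append(currentTag)
--         tagList=CurrentTagList
--         n+=1
--     return tagList
-- ===== SOURCE B (Python) =====
-- def candidateTagSet(length):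
--     tagSet = ('O', 'PER', 'LOC', 'ORG', 'MISC')
--     if length <= 1:
--         return [[t] for t in tagSet]
--     prev = candidateTagSet(length - 1)
--     return [item + [tag] for item in prev for tag in tagSet]
-- ===== Notes on version B (the rewrite author's own statement) =====
-- stated objective: simpler
-- what changed: Replaced the iterative while-loop that rebuilds an intermediate list level by level with a direct recursion on length (base case length<=1, otherwise extend each sequence of length-1 by each tag via one comprehension).
import Mathlib
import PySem

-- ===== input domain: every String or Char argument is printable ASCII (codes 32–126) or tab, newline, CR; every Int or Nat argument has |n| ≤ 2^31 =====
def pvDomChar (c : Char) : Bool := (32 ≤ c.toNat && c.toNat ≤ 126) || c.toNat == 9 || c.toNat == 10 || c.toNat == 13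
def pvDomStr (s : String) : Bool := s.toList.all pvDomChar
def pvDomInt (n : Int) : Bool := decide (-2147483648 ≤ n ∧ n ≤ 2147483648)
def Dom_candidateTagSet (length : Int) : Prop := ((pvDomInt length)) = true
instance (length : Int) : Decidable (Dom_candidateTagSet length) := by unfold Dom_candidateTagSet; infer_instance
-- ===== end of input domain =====

-- B replaces A's iterative level-by-level construction with a direct recursion on length; objective: simpler.


-- ===== PORT A =====
-- tagSet constant, shared literal of A's Python
def pvTagsA : List String := ["O", "PER", "LOC", "ORG", "MISC"]

-- one pass of A's while-body: nested for-loops appending item+[tag]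
def pvStepA (tagList : List (List String)) : List (List String) :=
  tagList.foldl (fun acc item =>
    pvTagsA.foldl (fun acc2 tag => acc2 ++ [item ++ [tag]]) acc) []

-- the while loop: runs while n < length, i.e. (length - 1).toNat times
def pvLoopA : Nat → List (List String) → List (List String)
  | 0, tagList => tagList
  | k + 1, tagList => pvLoopA k (pvStepA tagList)

def candidateTagSet (length : Int) : List (List String) :=
  pvLoopA (length - 1).toNat [["O"], ["PER"], ["LOC"], ["ORG"], ["MISC"]]

-- ===== PORT B =====
def pvTagsB : List String := ["O", "PER", "LOC", "ORG", "MISC"]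

-- recursion on length, counted as (length - 1).toNat: 0 = base case length <= 1
def pvAltGo : Nat → List (List String)
  | 0 => pvTagsB.map (fun t => [t])
  | k + 1 => (pvAltGo k).flatMap (fun item => pvTagsB.map (fun tag => item ++ [tag]))

def candidateTagSet_alt (length : Int) : List (List String) :=
  pvAltGo (length - 1).toNat

-- ===== PRECONDITION & SPEC =====
def Spec_candidateTagSet (length : Int) (out : List (List String)) : Prop := out = candidateTagSet_alt length
instance (length : Int) (out : List (List String)) : Decidable (Spec_candidateTagSet length out) := by unfold Spec_candidateTagSet; infer_instance

-- ===== CLAIM (what is proved, stated in full; the proofs are below) =====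
def Claim_equal_candidateTagSet : Prop := ∀ (length : Int), Dom_candidateTagSet length → Spec_candidateTagSet length (candidateTagSet length)

-- ===== LEMMAS AND PROOFS =====
theorem pvStepA_acc (l : List (List String)) (a : List (List String)) :
    l.foldl (fun acc item => pvTagsA.foldl (fun acc2 tag => acc2 ++ [item ++ [tag]]) acc) a
      = a ++ l.flatMap (fun item => pvTagsA.map (fun tag => item ++ [tag])) := by
  induction l generalizing a with
  | nil => simp
  | cons x xs ih =>
    rw [List.foldl_cons, List.flatMap_cons, ih]
    simp [pvTagsA]

theorem pvStepA_eq (l : List (List String)) :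
    pvStepA l = l.flatMap (fun item => pvTagsB.map (fun tag => item ++ [tag])) := by
  have h := pvStepA_acc l []
  simpa [pvStepA, pvTagsA, pvTagsB] using h

theorem pvLoopA_succ (k : Nat) (l : List (List String)) :
    pvLoopA (k + 1) l = pvStepA (pvLoopA k l) := by
  induction k generalizing l with
  | zero => rfl
  | succ n ih => simpa [pvLoopA] using ih (pvStepA l)

theorem pvLoopA_eq_altGo (k : Nat) :
    pvLoopA k [["O"], ["PER"], ["LOC"], ["ORG"], ["MISC"]] = pvAltGo k := by
  induction k with
  | zero => rfl
  | succ n ih => rw [pvLoopA_succ, ih, pvStepA_eq]; rfl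

-- ===== VERDICT (by name: the statement is the Claim_ definition above) =====
theorem candidateTagSet_spec : Claim_equal_candidateTagSet := by
  intro length _
  unfold Spec_candidateTagSet candidateTagSet candidateTagSet_alt
  exact pvLoopA_eq_altGo _
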